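-- pv_equiv track=rewrite | github.com/Lianaburko/accelerator | functions.py | get_list_of_vars
-- ===== SOURCE A (Python) =====
-- def get_list_of_vars(s):
--     list_vars = []
--     set_vars = set()
--     i = 0
--     while i < len(s):
--         l_s = ''
--         while i < len(s) and s[i] not in '+-*/()': # Можно сделать ключи co словаря с операциями
--             l_s += s[i]
--             i += 1
--         i += 1
--         if l_s != '':
--             list_vars.append(l_s)
--             set_vars.add(l_s) # set with variables
--
--     return list_vars
-- ===== SOURCE B (Python) =====
-- import re
--
-- def get_list_of_vars(s):
--     return [t for t in re.split(r'[-+*/()]', s) if t]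
-- ===== Notes on version B (the rewrite author's own statement) =====
-- stated objective: idiomatic
-- what changed: Replaced the index-based nested while loops with character-by-character string accumulation by a single regex split on the operator/parenthesis class followed by filtering out empty tokens.
import Mathlib
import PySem

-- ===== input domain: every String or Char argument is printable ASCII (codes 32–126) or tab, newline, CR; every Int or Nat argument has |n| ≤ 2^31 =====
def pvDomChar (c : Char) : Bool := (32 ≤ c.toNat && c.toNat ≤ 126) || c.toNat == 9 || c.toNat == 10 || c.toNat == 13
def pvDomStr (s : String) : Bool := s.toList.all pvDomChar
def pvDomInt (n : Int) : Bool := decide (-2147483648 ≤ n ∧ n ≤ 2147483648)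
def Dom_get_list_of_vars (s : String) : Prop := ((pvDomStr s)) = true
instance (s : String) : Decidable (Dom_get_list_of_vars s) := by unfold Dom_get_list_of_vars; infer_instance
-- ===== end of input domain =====

-- B replaces A's index-based nested while loops by a single split on the operator
-- character class followed by dropping empty tokens (objective: idiomatic).

-- ===== PORT A =====
-- membership test `s[i] in '+-*/()'`
def pvIsOpA (c : Char) : Bool :=
  c == '+' || c == '-' || c == '*' || c == '/' || c == '(' || c == ')'

-- inner while loop: accumulate the token character by character; on exit the
-- `i += 1` skips the delimiter (or moves past the end), so we drop the head of
-- the remainder.  Returns (token, rest of the string after the skip).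
def pvInnerA : List Char → List Char × List Char
  | [] => ([], [])
  | c :: rest =>
      if pvIsOpA c then ([], rest)
      else
        let pr := pvInnerA rest
        (c :: pr.1, pr.2)

theorem pvInnerA_len_le : ∀ cs : List Char, (pvInnerA cs).2.length ≤ cs.length
  | [] => Nat.le_refl _
  | c :: rest => by
      simp only [pvInnerA]
      split
      · simp
      · simpa using Nat.le_succ_of_le (pvInnerA_len_le rest)

theorem pvInnerA_len_lt (c : Char) (rest : List Char) :
    (pvInnerA (c :: rest)).2.length < (c :: rest).length := by
  simp only [pvInnerA]
  split
  · simp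
  · simpa using Nat.lt_succ_of_le (pvInnerA_len_le rest)

-- outer while loop: while i < len(s), read one token, append it if nonempty.
def pvOuterA : List Char → List String
  | [] => []
  | c :: rest =>
      let pr := pvInnerA (c :: rest)
      if pr.1.isEmpty then pvOuterA pr.2 else String.ofList pr.1 :: pvOuterA pr.2
termination_by cs => cs.length
decreasing_by
  all_goals exact pvInnerA_len_lt c rest

def get_list_of_vars (s : String) : List String := pvOuterA s.toList

-- ===== PORT B =====
-- the regex character class [-+*/()]
def pvIsOpB (c : Char) : Bool :=
  c == '-' || c == '+' || c == '*' || c == '/' || c == '(' || c == ')'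

-- re.split on the class, then keep the non-empty parts
def get_list_of_vars_alt (s : String) : List String :=
  ((s.toList.splitOnP pvIsOpB).filter (fun t => !t.isEmpty)).map String.ofList

-- ===== PRECONDITION & SPEC =====
def Spec_get_list_of_vars (s : String) (out : List String) : Prop := out = get_list_of_vars_alt s
instance (s : String) (out : List String) : Decidable (Spec_get_list_of_vars s out) := by unfold Spec_get_list_of_vars; infer_instance

-- ===== CLAIM (what is proved, stated in full; the proofs are below) =====
def Claim_equal_get_list_of_vars : Prop := ∀ (s : String), Dom_get_list_of_vars s → Spec_get_list_of_vars s (get_list_of_vars s)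

-- ===== LEMMAS AND PROOFS =====

theorem pvIsOp_eq : pvIsOpA = pvIsOpB := by
  funext c
  cases h1 : (c == '+') <;> cases h2 : (c == '-') <;> simp [pvIsOpA, pvIsOpB, h1, h2]

def pvClean (xs : List (List Char)) : List String :=
  (xs.filter (fun t => !t.isEmpty)).map String.ofList

theorem pvInnerA_eq (cs : List Char) :
    pvInnerA cs = (cs.takeWhile (fun c => !pvIsOpA c), (cs.dropWhile (fun c => !pvIsOpA c)).tail) := by
  induction cs with
  | nil => simp [pvInnerA]
  | cons c rest ih =>
      simp only [pvInnerA, List.takeWhile, List.dropWhile]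
      cases h : pvIsOpA c <;> simp [ih]

theorem pvSplitOnP_eq (p : Char → Bool) (cs : List Char) :
    cs.splitOnP p = cs.takeWhile (fun c => !p c) ::
      (match cs.dropWhile (fun c => !p c) with
       | [] => []
       | _ :: r => r.splitOnP p) := by
  induction cs with
  | nil => simp [List.splitOnP_nil]
  | cons c rest ih =>
      rw [List.splitOnP_cons]
      cases h : p c <;> simp [h, List.takeWhile, List.dropWhile, ih]

theorem pvMain : ∀ (n : Nat) (cs : List Char), cs.length ≤ n →
    pvOuterA cs = pvClean (cs.splitOnP pvIsOpA) := by
  intro n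
  induction n with
  | zero =>
      intro cs h
      have : cs = [] := List.eq_nil_of_length_eq_zero (Nat.le_zero.mp h)
      subst this
      simp [pvOuterA, List.splitOnP_nil, pvClean]
  | succ n ih =>
      intro cs h
      cases cs with
      | nil => simp [pvOuterA, List.splitOnP_nil, pvClean]
      | cons c rest =>
          rw [pvSplitOnP_eq]
          simp only [pvOuterA, pvInnerA_eq]
          cases hd : (c :: rest).dropWhile (fun c => !pvIsOpA c) with
          | nil =>
              simp only [List.tail_nil]
              cases ht : (c :: rest).takeWhile (fun c => !pvIsOpA c) <;>
                simp [pvClean, pvOuterA]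
          | cons d r =>
              have hr : r.length ≤ n := by
                have h2 := List.length_dropWhile_le (fun c => !pvIsOpA c) (c :: rest)
                rw [hd] at h2
                simp only [List.length_cons] at h2 h
                omega
              have hrec := ih r hr
              simp only [List.tail_cons]
              cases ht : (c :: rest).takeWhile (fun c => !pvIsOpA c) <;>
                simp [pvClean, hrec]

-- ===== VERDICT (by name: the statement is the Claim_ definition above) =====
theorem get_list_of_vars_spec : Claim_equal_get_list_of_vars := by
  intro s _
  unfold Spec_get_list_of_vars get_list_of_vars get_list_of_vars_alt
  rw [pvMain s.toList.length s.toList (Nat.le_refl _), pvIsOp_eq]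
  rfl
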